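-- pv_equiv track=rewrite | github.com/rodinVasiliy/kmzi_lab2 | main.py | lfsr2
-- ===== SOURCE A (Python) =====
-- def lfsr2(n):
--     flag = 0
--     period = 0
--     cnt = 0
--     start_state = 0b11111111
--     state = 0b11111111
--     lst = list()
--     lst.append(state & 1)
--     while(cnt < n):
--         newbit = ((state >> 7) ^ (state >> 5) ^ (state >> 3) ^ state) & 1
--         state = (state >> 1) | (newbit << 6)
--         lst.append(state & 1)
--         cnt += 1
--         if start_state == state and flag == 0:
--             flag = 1
--             period = cnt
--     string = "".join(map(str, lst))
--     return lst, string, period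
-- ===== SOURCE B (Python) =====
-- def lfsr2(n):
--     # pass 1: generate the full list of states (initial + each update)
--     state = 0b11111111
--     states = [state]
--     i = 0
--     while i < n:
--         newbit = ((state >> 7) ^ (state >> 5) ^ (state >> 3) ^ state) & 1
--         state = (state >> 1) | (newbit << 6)
--         states.append(state)
--         i += 1
--     # pass 2: derive the output bits and the string
--     lst = [s & 1 for s in states]
--     string = "".join(map(str, lst))
--     # pass 3: first index (>= 1) whose state equals the start state, else 0
--     period = 0
--     for idx in range(1, len(states)):
--         if states[idx] == 0b11111111:
--             period = idx
--             break
--     return lst, string, period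
-- ===== Notes on version B (the rewrite author's own statement) =====
-- stated objective: alternative
-- what changed: A fuses generation, bit extraction, string building and period detection into one while-loop with flag/period accumulators; B first generates the full list of states in one pass, then derives the bits and string from it, then scans the updated states for the first occurrence of the start state in a separate pass.
import Mathlib
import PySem

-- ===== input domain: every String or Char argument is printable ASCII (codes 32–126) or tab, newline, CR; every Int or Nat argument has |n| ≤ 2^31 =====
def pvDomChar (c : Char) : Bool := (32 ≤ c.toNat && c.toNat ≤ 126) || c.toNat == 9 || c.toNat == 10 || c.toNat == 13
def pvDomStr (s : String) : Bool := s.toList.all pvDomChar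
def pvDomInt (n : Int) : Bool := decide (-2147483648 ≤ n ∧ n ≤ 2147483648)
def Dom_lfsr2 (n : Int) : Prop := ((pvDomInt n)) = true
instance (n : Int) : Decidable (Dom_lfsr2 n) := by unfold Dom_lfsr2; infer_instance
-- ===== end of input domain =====

-- B separates A's fused while-loop into three passes (generate states, derive bits/string,
-- scan for the period); objective: alternative decomposition, same cost.

-- ===== PORT A =====
-- the while-loop of A: state = (flag, period, cnt, state, lst); returns (lst, period)
def lfsr2Loop (n flag period cnt state : Int) (lst : List Int) : List Int × Int :=
  if cnt < n then
    let newbit := PySem.Int.band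
      (PySem.Int.bxor (PySem.Int.bxor (PySem.Int.bxor (state >>> 7) (state >>> 5)) (state >>> 3)) state) 1
    let state' := PySem.Int.bor (state >>> 1) (newbit <<< 6)
    let lst' := lst ++ [PySem.Int.band state' 1]
    let cnt' := cnt + 1
    if 255 = state' ∧ flag = 0 then
      lfsr2Loop n 1 cnt' cnt' state' lst'
    else
      lfsr2Loop n flag period cnt' state' lst'
  else (lst, period)
termination_by (n - cnt).toNat
decreasing_by all_goals omega

def lfsr2 (n : Int) : List Int × String × Int :=
  let r := lfsr2Loop n 0 0 0 255 [PySem.Int.band 255 1]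
  (r.1, PySem.Str.join "" (r.1.map PySem.Int.toStr), r.2)

-- ===== PORT B =====
-- pass 1 of B: the list of updated states (after the initial one)
def lfsr2AltStates (n i state : Int) : List Int :=
  if i < n then
    let newbit := PySem.Int.band
      (PySem.Int.bxor (PySem.Int.bxor (PySem.Int.bxor (state >>> 7) (state >>> 5)) (state >>> 3)) state) 1
    let state' := PySem.Int.bor (state >>> 1) (newbit <<< 6)
    state' :: lfsr2AltStates n (i + 1) state'
  else []
termination_by (n - i).toNat
decreasing_by omega

-- pass 3 of B: first index (counting from idx) whose state is 255, else 0
def lfsr2AltPeriod : List Int → Int → Int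
  | [], _ => 0
  | s :: rest, idx => if s = 255 then idx else lfsr2AltPeriod rest (idx + 1)

def lfsr2_alt (n : Int) : List Int × String × Int :=
  let states := 255 :: lfsr2AltStates n 0 255
  let lst := states.map (fun s => PySem.Int.band s 1)
  let string := PySem.Str.join "" (lst.map PySem.Int.toStr)
  let period := lfsr2AltPeriod states.tail 1
  (lst, string, period)

-- ===== PRECONDITION & SPEC =====
def Spec_lfsr2 (n : Int) (out : List Int × String × Int) : Prop := out = lfsr2_alt n
instance (n : Int) (out : List Int × String × Int) : Decidable (Spec_lfsr2 n out) := by unfold Spec_lfsr2; infer_instance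

-- ===== CLAIM (what is proved, stated in full; the proofs are below) =====
def Claim_equal_lfsr2 : Prop := ∀ (n : Int), Dom_lfsr2 n → Spec_lfsr2 n (lfsr2 n)

-- ===== LEMMAS AND PROOFS =====

-- period scan with an explicit default (A keeps the previous period when no match occurs)
def periodAux : List Int → Int → Int → Int
  | [], _, d => d
  | s :: rest, idx, d => if s = 255 then idx else periodAux rest (idx + 1) d

theorem altPeriod_eq_aux (l : List Int) (idx : Int) :
    lfsr2AltPeriod l idx = periodAux l idx 0 := by
  induction l generalizing idx with
  | nil => rfl
  | cons s rest ih => simp [lfsr2AltPeriod, periodAux, ih]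

theorem loop_flag1 (n : Int) (m : Nat) (cnt state p : Int) (lst : List Int)
    (hm : (n - cnt).toNat = m) :
    lfsr2Loop n 1 p cnt state lst
      = (lst ++ (lfsr2AltStates n cnt state).map (fun s => PySem.Int.band s 1), p) := by
  induction m generalizing cnt state lst with
  | zero =>
    rw [lfsr2Loop, lfsr2AltStates]
    rw [if_neg (by omega), if_neg (by omega)]
    simp
  | succ m ih =>
    rw [lfsr2Loop, lfsr2AltStates]
    rw [if_pos (by omega : cnt < n), if_pos (by omega : cnt < n)]
    simp only
    rw [if_neg (by simp)]
    rw [ih (cnt + 1) _ _ (by omega)]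
    simp

theorem loop_flag0 (n : Int) (m : Nat) (cnt state p : Int) (lst : List Int)
    (hm : (n - cnt).toNat = m) :
    lfsr2Loop n 0 p cnt state lst
      = (lst ++ (lfsr2AltStates n cnt state).map (fun s => PySem.Int.band s 1),
         periodAux (lfsr2AltStates n cnt state) (cnt + 1) p) := by
  induction m generalizing cnt state lst with
  | zero =>
    rw [lfsr2Loop, lfsr2AltStates]
    rw [if_neg (by omega), if_neg (by omega)]
    simp [periodAux]
  | succ m ih =>
    rw [lfsr2Loop, lfsr2AltStates]
    rw [if_pos (by omega : cnt < n), if_pos (by omega : cnt < n)]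
    simp only
    by_cases h255 : 255 = PySem.Int.bor (state >>> 1)
        ((PySem.Int.band (PySem.Int.bxor (PySem.Int.bxor (PySem.Int.bxor (state >>> 7) (state >>> 5)) (state >>> 3)) state) 1) <<< 6)
    · rw [if_pos ⟨h255, trivial⟩]
      rw [loop_flag1 n m (cnt + 1) _ (cnt + 1) _ (by omega)]
      simp [periodAux, h255.symm]
    · rw [if_neg (by tauto)]
      rw [ih (cnt + 1) _ _ (by omega)]
      simp only [periodAux]
      rw [if_neg (fun h => h255 h.symm)]
      simp

-- ===== VERDICT (by name: the statement is the Claim_ definition above) =====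
theorem lfsr2_spec : Claim_equal_lfsr2 := by
  intro n _
  unfold Spec_lfsr2 lfsr2 lfsr2_alt
  rw [loop_flag0 n (n - 0).toNat 0 255 0 _ rfl]
  simp [altPeriod_eq_aux]
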